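-- pv_equiv track=rewrite | github.com/serweryn617/AoC | 24/22/puzzle.py | diff_sequence
-- ===== SOURCE A (Python) =====
-- def fast_randomize(x):
--     x = (x << 6 ^ x) & 0xffffff
--     x = (x >> 5 ^ x) & 0xffffff
--     return (x << 11 ^ x) & 0xffffff
--
-- def digit_diff(a, b):
--     return a % 10 - b % 10
--
-- def diff_sequence(n, i):
--     prices = []
--     diffs = []
--     prev = n
--
--     for _ in range(i - 1):
--         n = fast_randomize(n)
--         diffs.append(digit_diff(n, prev))
--         prices.append(n % 10)
--         prev = n
--
--     return prices, diffs
-- ===== SOURCE B (Python) =====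
-- def fast_randomize(x):
--     x = (x << 6 ^ x) & 0xffffff
--     x = (x >> 5 ^ x) & 0xffffff
--     return (x << 11 ^ x) & 0xffffff
--
--
-- def diff_sequence(n, i):
--     # Phase 1: materialize the whole RNG state sequence (initial value + successors).
--     s = [n]
--     cur = n
--     for _ in range(i - 1):
--         cur = fast_randomize(cur)
--         s.append(cur)
--     # Phase 2: derive prices and digit diffs in two independent passes.
--     prices = [v % 10 for v in s[1:]]
--     diffs = [b % 10 - a % 10 for a, b in zip(s, s[1:])]
--     return prices, diffs
-- ===== Notes on version B (the rewrite author's own statement) =====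
-- stated objective: alternative
-- what changed: Replaces the single fused loop that appends to prices and diffs while advancing the RNG by a generation phase that materializes the full state sequence, followed by two independent derivation passes (a map for prices and a zip of the sequence with its tail for diffs).
import Mathlib
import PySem

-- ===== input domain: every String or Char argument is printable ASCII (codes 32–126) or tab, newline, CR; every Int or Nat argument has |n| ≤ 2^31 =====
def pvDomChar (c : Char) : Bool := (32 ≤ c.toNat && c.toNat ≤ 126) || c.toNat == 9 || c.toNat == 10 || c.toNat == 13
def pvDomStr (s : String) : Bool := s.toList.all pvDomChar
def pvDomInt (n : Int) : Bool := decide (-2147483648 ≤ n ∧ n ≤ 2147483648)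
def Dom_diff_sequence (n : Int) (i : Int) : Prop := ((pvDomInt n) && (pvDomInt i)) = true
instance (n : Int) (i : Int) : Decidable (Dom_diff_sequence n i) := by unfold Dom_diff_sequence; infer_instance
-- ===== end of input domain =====

-- B builds the whole RNG state sequence first, then derives prices and diffs in two
-- independent passes (alternative decomposition; return value proved equal to A's).

-- ===== PORT A =====
def fast_randomize (x : Int) : Int :=
  let x := PySem.Int.band (PySem.Int.bxor (x <<< 6) x) 0xffffff
  let x := PySem.Int.band (PySem.Int.bxor (x >>> 5) x) 0xffffff
  PySem.Int.band (PySem.Int.bxor (x <<< 11) x) 0xffffff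

def digit_diff (a : Int) (b : Int) : Int :=
  PySem.Int.mod a 10 - PySem.Int.mod b 10

-- fused loop: state is (prices, diffs, prev, n)
def diff_sequence (n : Int) (i : Int) : List Int × List Int :=
  let st := (PySem.List.pyRange 0 (i - 1) 1).foldl
    (fun (st : List Int × List Int × Int × Int) _ =>
      let m := fast_randomize st.2.2.2
      (st.1 ++ [PySem.Int.mod m 10], st.2.1 ++ [digit_diff m st.2.2.1], m, m))
    ([], [], n, n)
  (st.1, st.2.1)

-- ===== PORT B =====
def diff_sequence_alt (n : Int) (i : Int) : List Int × List Int :=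
  -- Phase 1: materialize the state sequence; loop state is (s, cur)
  let g := (PySem.List.pyRange 0 (i - 1) 1).foldl
    (fun (g : List Int × Int) _ =>
      let m := fast_randomize g.2
      (g.1 ++ [m], m))
    ([n], n)
  let s := g.1
  -- Phase 2: two independent derivation passes
  let prices := (PySem.List.slice s (some 1) none).map (fun v => PySem.Int.mod v 10)
  let diffs := (s.zip (PySem.List.slice s (some 1) none)).map
    (fun p => PySem.Int.mod p.2 10 - PySem.Int.mod p.1 10)
  (prices, diffs)

-- ===== PRECONDITION & SPEC =====
def Spec_diff_sequence (n : Int) (i : Int) (out : List Int × List Int) : Prop := out = diff_sequence_alt n i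
instance (n : Int) (i : Int) (out : List Int × List Int) : Decidable (Spec_diff_sequence n i out) := by unfold Spec_diff_sequence; infer_instance

-- ===== CLAIM (what is proved, stated in full; the proofs are below) =====
def Claim_equal_diff_sequence : Prop := ∀ (n : Int) (i : Int), Dom_diff_sequence n i → Spec_diff_sequence n i (diff_sequence n i)

-- ===== LEMMAS AND PROOFS =====

-- reference state sequence (successors only) and reference output
def pvS (c : Int) : Nat → List Int
  | 0 => []
  | k + 1 => fast_randomize c :: pvS (fast_randomize c) k

def pvG (c : Int) : Nat → List Int × List Int
  | 0 => ([], [])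
  | k + 1 =>
    let m := fast_randomize c
    (PySem.Int.mod m 10 :: (pvG m k).1,
     (PySem.Int.mod m 10 - PySem.Int.mod c 10) :: (pvG m k).2)

theorem foldA_eq (l : List Int) : ∀ (c : Int) (p d : List Int),
    (l.foldl
      (fun (st : List Int × List Int × Int × Int) _ =>
        (st.1 ++ [PySem.Int.mod (fast_randomize st.2.2.2) 10],
         st.2.1 ++ [digit_diff (fast_randomize st.2.2.2) st.2.2.1],
         fast_randomize st.2.2.2, fast_randomize st.2.2.2))
      (p, d, c, c)).1 = p ++ (pvG c l.length).1 ∧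
    (l.foldl
      (fun (st : List Int × List Int × Int × Int) _ =>
        (st.1 ++ [PySem.Int.mod (fast_randomize st.2.2.2) 10],
         st.2.1 ++ [digit_diff (fast_randomize st.2.2.2) st.2.2.1],
         fast_randomize st.2.2.2, fast_randomize st.2.2.2))
      (p, d, c, c)).2.1 = d ++ (pvG c l.length).2 := by
  induction l with
  | nil => intro c p d; simp [pvG]
  | cons x l ih =>
    intro c p d
    simpa [pvG, digit_diff, List.append_assoc] using
      ih (fast_randomize c) (p ++ [PySem.Int.mod (fast_randomize c) 10])
        (d ++ [digit_diff (fast_randomize c) c])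

theorem slice_one_tail (s : List Int) : PySem.List.slice s (some 1) none = s.tail := by
  simpa using PySem.List.slice_from_natCast s 1

theorem foldB_eq (l : List Int) : ∀ (c : Int) (s : List Int),
    (l.foldl
      (fun (g : List Int × Int) _ =>
        (g.1 ++ [fast_randomize g.2], fast_randomize g.2))
      (s, c)).1 = s ++ pvS c l.length := by
  induction l with
  | nil => intro c s; simp [pvS]
  | cons x l ih =>
    intro c s
    simpa [pvS, List.append_assoc] using ih (fast_randomize c) (s ++ [fast_randomize c])

theorem map_pvS (k : Nat) : ∀ (c : Int),
    (pvS c k).map (fun v => PySem.Int.mod v 10) = (pvG c k).1 := by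
  induction k with
  | zero => intro c; simp [pvS, pvG]
  | succ k ih =>
    intro c
    simp only [pvS, pvG, List.map_cons, List.cons.injEq]
    exact ⟨by trivial, ih _⟩

theorem zip_pvS (k : Nat) : ∀ (c : Int),
    ((c :: pvS c k).zip (pvS c k)).map
      (fun p => PySem.Int.mod p.2 10 - PySem.Int.mod p.1 10) = (pvG c k).2 := by
  induction k with
  | zero => intro c; simp [pvS, pvG]
  | succ k ih =>
    intro c
    simp only [pvS, pvG, List.zip_cons_cons, List.map_cons, List.cons.injEq]
    exact ⟨by trivial, ih _⟩

-- ===== VERDICT (by name: the statement is the Claim_ definition above) =====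
theorem diff_sequence_spec : Claim_equal_diff_sequence := by
  intro n i _
  unfold Spec_diff_sequence diff_sequence diff_sequence_alt
  have hA := foldA_eq (PySem.List.pyRange 0 (i - 1) 1) n ([] : List Int) ([] : List Int)
  have hB := foldB_eq (PySem.List.pyRange 0 (i - 1) 1) n [n]
  simp only [slice_one_tail, hA.1, hA.2, hB, List.nil_append, List.singleton_append,
    List.tail_cons]
  rw [map_pvS, zip_pvS]
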